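-- pv_equiv track=rewrite | github.com/alexandraback/datacollection | solutions_2692487_1/Python/Nickyname/1A.py | mote
-- ===== SOURCE A (Python) =====
-- def mote(m,l,ans):
--     if len(l)==0:
--         return ans
--     else:
--         if (m<=l[0] and (m+m-1)>l[0]):
--             ans+=1
--             m+=m-1
--             return mote(m,l,ans)
--         else:
--             if(m<=l[0] and (m+m-1)<=l[0]):
--                 ans+=1
--                 return mote(m,l[1:],ans)
--             else:
--                 m+=l[0]
--                 return mote(m,l[1:],ans)
-- ===== SOURCE B (Python) =====
-- def mote(m, l, ans):
--     # One forward pass, each element consumed exactly once (the recurse-on-same-list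
--     # step of A is fused with the step that must follow it), no list slicing.
--     for x in l:
--         if m <= x:
--             ans += 1
--             if m + m - 1 > x:
--                 m = m + m - 1 + x
--         else:
--             m += x
--     return ans
-- ===== Notes on version B (the rewrite author's own statement) =====
-- stated objective: faster
-- what changed: Replaces A's recursion with repeated list slicing (and a recurse-on-the-same-list branch) by a single for-loop over the elements in which every element is consumed exactly once, fusing A's non-advancing branch with the step that necessarily follows it.
import Mathlib
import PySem

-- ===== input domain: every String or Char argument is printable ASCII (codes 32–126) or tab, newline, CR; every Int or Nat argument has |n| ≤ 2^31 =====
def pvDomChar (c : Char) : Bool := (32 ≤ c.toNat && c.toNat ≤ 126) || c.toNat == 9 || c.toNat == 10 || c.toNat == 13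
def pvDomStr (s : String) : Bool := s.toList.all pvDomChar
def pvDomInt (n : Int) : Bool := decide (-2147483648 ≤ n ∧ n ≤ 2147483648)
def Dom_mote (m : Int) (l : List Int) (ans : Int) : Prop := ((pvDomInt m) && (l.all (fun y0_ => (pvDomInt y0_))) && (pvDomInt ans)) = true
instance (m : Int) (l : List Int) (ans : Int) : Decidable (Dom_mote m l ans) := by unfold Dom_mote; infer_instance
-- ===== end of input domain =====

-- B replaces A's slicing recursion by one for-loop visiting each element once (O(n) instead of O(n^2)).

-- ===== PORT A =====
-- A's recursion; the first branch recurses on the SAME list with a larger m, so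
-- termination uses the measure 2*len + (1 if that branch's condition holds, else 0):
-- after that branch the new m exceeds l[0], so the condition fails at the next call.
def moteExtra (m : Int) (l : List Int) : Nat :=
  match l with
  | [] => 0
  | x :: _ => if m ≤ x ∧ m + m - 1 > x then 1 else 0

theorem moteExtra_le (m : Int) (l : List Int) : moteExtra m l ≤ 1 := by
  cases l
  · simp [moteExtra]
  · simp only [moteExtra]; split_ifs <;> omega

def mote (m : Int) (l : List Int) (ans : Int) : Int :=
  match l with
  | [] => ans
  | x :: xs =>
    if m ≤ x ∧ m + m - 1 > x then
      mote (m + (m - 1)) (x :: xs) (ans + 1)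
    else if m ≤ x ∧ m + m - 1 ≤ x then
      mote m xs (ans + 1)
    else
      mote (m + x) xs ans
termination_by 2 * l.length + moteExtra m l
decreasing_by
  · simp only [moteExtra]; split_ifs <;> omega
  · have h1 := moteExtra_le m xs; simp only [List.length_cons]; omega
  · have h1 := moteExtra_le (m + x) xs; simp only [List.length_cons]; omega

-- ===== PORT B =====
def mote_alt (m : Int) (l : List Int) (ans : Int) : Int :=
  (l.foldl (fun (s : Int × Int) x =>
    if s.1 ≤ x then
      if s.1 + s.1 - 1 > x then (s.1 + s.1 - 1 + x, s.2 + 1) else (s.1, s.2 + 1)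
    else (s.1 + x, s.2)) (m, ans)).2

-- ===== PRECONDITION & SPEC =====
def Spec_mote (m : Int) (l : List Int) (ans : Int) (out : Int) : Prop := out = mote_alt m l ans
instance (m : Int) (l : List Int) (ans : Int) (out : Int) : Decidable (Spec_mote m l ans out) := by unfold Spec_mote; infer_instance

-- ===== CLAIM (what is proved, stated in full; the proofs are below) =====
def Claim_equal_mote : Prop := ∀ (m : Int) (l : List Int) (ans : Int), Dom_mote m l ans → Spec_mote m l ans (mote m l ans)

-- ===== LEMMAS AND PROOFS =====
theorem mote_eq_alt (l : List Int) : ∀ (m ans : Int), mote m l ans = mote_alt m l ans := by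
  induction l with
  | nil => intro m ans; simp [mote, mote_alt]
  | cons x xs ih =>
    intro m ans
    rw [mote]
    by_cases h1 : m ≤ x ∧ m + m - 1 > x
    · -- A recurses on the same list; the next call necessarily takes the third branch
      have h2 : ¬ (m + (m - 1) ≤ x) := by omega
      rw [if_pos h1, mote, if_neg (by omega), if_neg (by omega), ih]
      simp only [mote_alt, List.foldl_cons]
      rw [if_pos h1.1, if_pos h1.2]
      ring_nf
    · by_cases h2 : m ≤ x ∧ m + m - 1 ≤ x
      · rw [if_neg h1, if_pos h2, ih]
        simp only [mote_alt, List.foldl_cons]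
        rw [if_pos h2.1, if_neg (by omega)]
      · rw [if_neg h1, if_neg h2, ih]
        simp only [mote_alt, List.foldl_cons]
        rw [if_neg (by omega)]

-- ===== VERDICT (by name: the statement is the Claim_ definition above) =====
theorem mote_spec : Claim_equal_mote := by
  intro m l ans _
  unfold Spec_mote
  exact mote_eq_alt l m ans
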